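-- pv_equiv track=rewrite | github.com/koii-network/prometheus-beta | src/equal_subset_sum_partitions.py | count_equal_subset_sum_partitions
-- ===== SOURCE A (Python) =====
-- from typing import List
--
-- def count_equal_subset_sum_partitions(nums: List[int]) -> int:
--     """
--     Calculate the number of ways a group of distinct numbers can be partitioned
--     into two subsets with equal sums.
--
--     Args:
--         nums (List[int]): A list of distinct integers
--
--     Returns:
--         int: Number of ways to partition the numbers into two equal sum subsets
--
--     Raises:
--         ValueError: If the input list contains duplicates
--     """
--     # Validate input - ensure all numbers are distinct
--     if len(set(nums)) != len(nums):
--         raise ValueError("Input must contain distinct numbers")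
--
--     # If total sum is odd, no equal partition is possible
--     total_sum = sum(nums)
--     if total_sum % 2 != 0:
--         return 0
--
--     target_sum = total_sum // 2
--     n = len(nums)
--
--     # Dynamic programming approach to count subset sum combinations
--     # dp[i][j] represents the number of ways to achieve sum j using first i elements
--     dp = [[0] * (target_sum + 1) for _ in range(n + 1)]
--
--     # Base case: zero sum can be achieved in one way (by selecting no elements)
--     for i in range(n + 1):
--         dp[i][0] = 1
--
--     # Fill the dp table
--     for i in range(1, n + 1):
--         for j in range(1, target_sum + 1):
--             # If current number is less than or equal to current sum
--             if nums[i-1] <= j: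
--                 # Two choices: include or exclude current number
--                 dp[i][j] = dp[i-1][j] + dp[i-1][j - nums[i-1]]
--             else:
--                 # Can only exclude current number
--                 dp[i][j] = dp[i-1][j]
--
--     # Return number of ways to achieve half the total sum with given numbers
--     return dp[n][target_sum] // 2
-- ===== SOURCE B (Python) =====
-- from typing import List
--
-- def count_equal_subset_sum_partitions(nums: List[int]) -> int:
--     # Validate input - ensure all numbers are distinct
--     if len(set(nums)) != len(nums):
--         raise ValueError("Input must contain distinct numbers")
--
--     total_sum = sum(nums)
--     if total_sum % 2 != 0:
--         return 0
--     target_sum = total_sum // 2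
--
--     # Meet in the middle: enumerate all subset sums of each half,
--     # then join the two enumerations through a counter on the left half.
--     mid = len(nums) // 2
--     left_counts = {}
--     for s in _subset_sums(nums[:mid]):
--         left_counts[s] = left_counts.get(s, 0) + 1
--
--     ways = 0
--     for s in _subset_sums(nums[mid:]):
--         ways += left_counts.get(target_sum - s, 0)
--     return ways // 2
--
--
-- def _subset_sums(part: List[int]) -> List[int]:
--     """All 2**len(part) subset sums of part (with multiplicity)."""
--     sums = [0]
--     for x in part:
--         sums = sums + [s + x for s in sums]
--     return sums
-- ===== Notes on version B (the rewrite author's own statement) =====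
-- stated objective: alternative
-- what changed: Replaces the (n+1)x(target+1) bottom-up DP table with meet-in-the-middle: the list is split into two halves, every subset sum of each half is enumerated explicitly, the left half's sums are tallied into a counter, and the answer is the join sum of counter[target - s] over the right half's subset sums, halved.
-- intended difference: On duplicate-free even-total inputs that are nonempty with total 0, or whose elements are nonnegative and include 0 with some subset of the elements after the 0 summing to half the total, A undercounts the partitions (returning 0 on the witness [0] where B returns 1) because its DP pins dp[i][0]=1 instead of counting every subset of sum 0; B returns the true number of equal-sum partitions. — e.g. on count_equal_subset_sum_partitions([0]): A returns 0, B returns 1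
import Mathlib
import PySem

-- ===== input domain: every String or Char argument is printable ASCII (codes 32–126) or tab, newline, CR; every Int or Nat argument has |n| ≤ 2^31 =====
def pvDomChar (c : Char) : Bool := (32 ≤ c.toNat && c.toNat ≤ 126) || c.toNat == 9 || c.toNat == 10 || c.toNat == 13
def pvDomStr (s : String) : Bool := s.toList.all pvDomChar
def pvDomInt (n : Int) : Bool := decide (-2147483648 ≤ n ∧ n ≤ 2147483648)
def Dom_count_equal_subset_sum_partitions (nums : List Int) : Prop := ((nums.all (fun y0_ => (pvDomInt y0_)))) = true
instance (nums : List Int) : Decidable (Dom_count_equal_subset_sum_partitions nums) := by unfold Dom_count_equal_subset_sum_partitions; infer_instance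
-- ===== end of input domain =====

-- B replaces A's bottom-up DP table by meet-in-the-middle (enumerate each half's subset sums, join via a counter);
-- where A's pinned dp[i][0]=1 makes it undercount (inputs summing to 0 or containing 0), B returns the true count — declared as D_ below.

-- ===== PORT A =====
def count_equal_subset_sum_partitions (nums : List Int) : Int :=
  if (PySem.Set.ofList nums).length ≠ nums.length then 0
  else
    let total_sum := nums.sum
    if PySem.Int.mod total_sum 2 ≠ 0 then 0
    else
      let target_sum := PySem.Int.floordiv total_sum 2
      let n := nums.length
      let dp : List (List Int) := List.replicate (n+1) (List.replicate (target_sum+1).toNat 0)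
      let dp := (PySem.List.pyRange 0 ((n : Int)+1) 1).foldl
        (fun t i => PySem.List.pySetD t i (PySem.List.pySetD (PySem.List.pyGetD t i []) 0 1)) dp
      let dp := (PySem.List.pyRange 1 ((n : Int)+1) 1).foldl (fun t i =>
        (PySem.List.pyRange 1 (target_sum+1) 1).foldl (fun t j =>
          let x := PySem.List.pyGetD nums (i-1) 0
          let v := if x ≤ j then
              PySem.List.pyGetD (PySem.List.pyGetD t (i-1) []) j 0
                + PySem.List.pyGetD (PySem.List.pyGetD t (i-1) []) (j - x) 0
            else PySem.List.pyGetD (PySem.List.pyGetD t (i-1) []) j 0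
          PySem.List.pySetD t i (PySem.List.pySetD (PySem.List.pyGetD t i []) j v)) t) dp
      PySem.Int.floordiv (PySem.List.pyGetD (PySem.List.pyGetD dp (n : Int) []) target_sum 0) 2

-- ===== PORT B =====
-- all 2**len(part) subset sums of part (with multiplicity)
def subsetSums (part : List Int) : List Int :=
  part.foldl (fun sums x => sums ++ sums.map (fun s => s + x)) [0]

def count_equal_subset_sum_partitions_alt (nums : List Int) : Int :=
  if (PySem.Set.ofList nums).length ≠ nums.length then 0
  else
    let total_sum := nums.sum
    if PySem.Int.mod total_sum 2 ≠ 0 then 0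
    else
      let target_sum := PySem.Int.floordiv total_sum 2
      let mid : Int := PySem.Int.floordiv (nums.length : Int) 2
      let left_counts : PySem.Dict Int Int :=
        (subsetSums (PySem.List.slice nums none (some mid))).foldl
          (fun d s => d.insert s (d.getD s 0 + 1)) PySem.Dict.empty
      let ways : Int :=
        (subsetSums (PySem.List.slice nums (some mid) none)).foldl
          (fun acc s => acc + left_counts.getD (target_sum - s) 0) 0
      PySem.Int.floordiv ways 2

-- ===== PRECONDITION & SPEC =====
-- Pre_ is exactly where the Python A returns: it excludes duplicate lists (A raises ValueError) and
-- even-total lists other than total 0 that are negative-total or contain a negative element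
-- (A raises IndexError: its dp rows cover only sums 0..target, and negative numbers index past them).
def Pre_count_equal_subset_sum_partitions (nums : List Int) : Prop :=
  nums.Nodup ∧ (PySem.Int.mod nums.sum 2 ≠ 0 ∨ nums.sum = 0 ∨
    (2 ≤ nums.sum ∧ ∀ x ∈ nums, 0 ≤ x))
instance (nums : List Int) : Decidable (Pre_count_equal_subset_sum_partitions nums) := by
  unfold Pre_count_equal_subset_sum_partitions; infer_instance

def pvWitness_count_equal_subset_sum_partitions : List Int := [1, 2, 3]

-- the part of l strictly after the first 0 (empty if there is no 0)
def azTail (l : List Int) : List Int :=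
  match l with
  | [] => []
  | x :: xs => if x = 0 then xs else azTail xs

-- On duplicate-free even-total inputs that are nonempty with total 0, or whose elements are nonnegative and
-- include 0 with some subset of the elements after the 0 summing to half the total, A undercounts the
-- partitions (returning 0 on the witness [0] where B returns 1) because its DP pins dp[i][0]=1 instead of
-- counting every subset of sum 0; B returns the true number of equal-sum partitions.
def D_count_equal_subset_sum_partitions (nums : List Int) : Prop :=
  nums.Nodup ∧ PySem.Int.mod nums.sum 2 = 0 ∧
    ((nums ≠ [] ∧ nums.sum = 0) ∨
     (2 ≤ nums.sum ∧ (∀ x ∈ nums, 0 ≤ x) ∧ (0 : Int) ∈ nums ∧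
       ∃ s ∈ (azTail nums).sublists, 2 * s.sum = nums.sum))
instance (nums : List Int) : Decidable (D_count_equal_subset_sum_partitions nums) := by
  unfold D_count_equal_subset_sum_partitions; infer_instance

def Spec_count_equal_subset_sum_partitions (nums : List Int) (out : Int) : Prop :=
  ¬ D_count_equal_subset_sum_partitions nums → out = count_equal_subset_sum_partitions_alt nums
instance (nums : List Int) (out : Int) : Decidable (Spec_count_equal_subset_sum_partitions nums out) := by
  unfold Spec_count_equal_subset_sum_partitions; infer_instance

def pvDiffWitness_count_equal_subset_sum_partitions : List Int := [0]
def pvDiffWitnessOut_count_equal_subset_sum_partitions : Int × Int := (0, 1)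

-- ===== CLAIM (what is proved, stated in full; the proofs are below) =====
def Claim_unchanged_count_equal_subset_sum_partitions : Prop :=
  ∀ (nums : List Int), Dom_count_equal_subset_sum_partitions nums →
    Pre_count_equal_subset_sum_partitions nums →
    Spec_count_equal_subset_sum_partitions nums (count_equal_subset_sum_partitions nums)

def Claim_changed_count_equal_subset_sum_partitions : Prop :=
  Dom_count_equal_subset_sum_partitions (pvDiffWitness_count_equal_subset_sum_partitions) ∧
  Pre_count_equal_subset_sum_partitions (pvDiffWitness_count_equal_subset_sum_partitions) ∧
  D_count_equal_subset_sum_partitions (pvDiffWitness_count_equal_subset_sum_partitions) ∧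
  count_equal_subset_sum_partitions (pvDiffWitness_count_equal_subset_sum_partitions) = pvDiffWitnessOut_count_equal_subset_sum_partitions.1 ∧
  count_equal_subset_sum_partitions_alt (pvDiffWitness_count_equal_subset_sum_partitions) = pvDiffWitnessOut_count_equal_subset_sum_partitions.2 ∧
  pvDiffWitnessOut_count_equal_subset_sum_partitions.1 ≠ pvDiffWitnessOut_count_equal_subset_sum_partitions.2

def Claim_exact_count_equal_subset_sum_partitions : Prop :=
  ∀ (nums : List Int), Dom_count_equal_subset_sum_partitions nums →
    Pre_count_equal_subset_sum_partitions nums →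
    D_count_equal_subset_sum_partitions nums →
    count_equal_subset_sum_partitions nums ≠ count_equal_subset_sum_partitions_alt nums

-- ===== LEMMAS AND PROOFS =====

-- number of subsets (sublists) of l summing to j
def pvN (l : List Int) (j : Int) : Int := (l.sublists.countP (fun s => s.sum = j) : Int)

theorem pvN_nil (j : Int) : pvN [] j = if j = 0 then 1 else 0 := by
  by_cases h : j = 0 <;> simp [pvN, h] <;> omega

theorem pvN_concat (l : List Int) (x j : Int) : pvN (l ++ [x]) j = pvN l j + pvN l (j - x) := by
  have h2 : List.countP ((fun s => decide (List.sum s = j)) ∘ fun s => s ++ [x]) l.sublists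
      = List.countP (fun s => decide (s.sum = j - x)) l.sublists := by
    apply List.countP_congr
    intro s _
    simp [Function.comp]
    omega
  unfold pvN
  rw [List.sublists_concat, List.countP_append, List.countP_map, h2]
  push_cast
  ring

theorem pvN_neg (l : List Int) (hl : ∀ y ∈ l, 0 ≤ y) (j : Int) (hj : j < 0) : pvN l j = 0 := by
  unfold pvN
  norm_num
  intro s hs hsum
  have h0 : 0 ≤ s.sum := List.sum_nonneg (fun y hy => hl y (hs.subset hy))
  omega

theorem pvN_zero_pos (l : List Int) (hl : ∀ y ∈ l, 1 ≤ y) : pvN l 0 = 1 := by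
  induction l using List.reverseRecOn with
  | nil => simp [pvN]
  | append_singleton l x ih =>
    rw [pvN_concat, pvN_neg l (fun y hy => by have := hl y (by simp [hy]); omega) (0 - x)
        (by have := hl x (by simp); omega),
      ih (fun y hy => hl y (by simp [hy]))]
    ring

theorem not_mem_append_singleton {y x : Int} {l : List Int} (h1 : y ∉ l) (h2 : y ≠ x) :
    y ∉ l ++ [x] := by
  simp only [List.mem_append, List.mem_singleton]
  push_neg
  exact ⟨h1, h2⟩

theorem pvN_zero_nodup (l : List Int) (hnd : l.Nodup) (hl : ∀ y ∈ l, 0 ≤ y) :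
    pvN l 0 = if (0 : Int) ∈ l then 2 else 1 := by
  induction l using List.reverseRecOn with
  | nil => simp [pvN]
  | append_singleton l x ih =>
    have h := List.nodup_append.mp hnd
    have hxl : x ∉ l := fun hx => h.2.2 x hx x (by simp) rfl
    have hx0 : 0 ≤ x := hl x (by simp)
    have hih := ih h.1 (fun y hy => hl y (by simp [hy]))
    rw [pvN_concat]
    by_cases hz : x = 0
    · subst hz
      have h0l : (0 : Int) ∉ l := hxl
      rw [if_neg h0l] at hih
      rw [show (0:Int) - 0 = 0 by ring, hih, if_pos (by simp)]
      norm_num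
    · have hxpos : 0 < x := lt_of_le_of_ne hx0 (fun h => hz h.symm)
      rw [pvN_neg l (fun y hy => hl y (by simp [hy])) (0 - x) (by omega), hih, add_zero]
      by_cases h0l : (0 : Int) ∈ l
      · rw [if_pos h0l, if_pos (by simp [h0l])]
      · rw [if_neg h0l, if_neg (not_mem_append_singleton h0l (fun h => hz h.symm))]

-- azTail facts
theorem azTail_subset (l : List Int) : ∀ y ∈ azTail l, y ∈ l := by
  induction l with
  | nil => simp [azTail]
  | cons x xs ih =>
    intro y hy
    unfold azTail at hy
    by_cases hx : x = 0
    · rw [if_pos hx] at hy; exact List.mem_cons_of_mem _ hy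
    · rw [if_neg hx] at hy; exact List.mem_cons_of_mem _ (ih y hy)

theorem azTail_not_mem_zero (l : List Int) (hnd : l.Nodup) : (0 : Int) ∉ azTail l := by
  induction l with
  | nil => simp [azTail]
  | cons x xs ih =>
    unfold azTail
    by_cases hx : x = 0
    · rw [if_pos hx]
      subst hx
      exact (List.nodup_cons.mp hnd).1
    · rw [if_neg hx]
      exact ih (List.nodup_cons.mp hnd).2

theorem azTail_append (l : List Int) (x : Int) :
    azTail (l ++ [x]) = if (0 : Int) ∈ l then azTail l ++ [x] else [] := by
  induction l with
  | nil =>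
    simp only [List.nil_append, List.not_mem_nil, if_false]
    unfold azTail
    by_cases hx : x = 0 <;> simp [hx, azTail]
  | cons y l ih =>
    by_cases hy : y = 0
    · subst hy
      simp [azTail]
    · have h1 : azTail ((y :: l) ++ [x]) = azTail (l ++ [x]) := by
        simp [azTail, hy]
      have h2 : azTail (y :: l) = azTail l := by simp [azTail, hy]
      rw [h1, ih, h2]
      by_cases h0 : (0 : Int) ∈ l
      · rw [if_pos h0, if_pos (by simp [h0])]
      · rw [if_neg h0, if_neg (by
          simp only [List.mem_cons]
          push_neg
          exact ⟨fun h => hy h.symm, h0⟩)]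

-- what A's dp actually tracks: true subset count minus the error seeded by the pinned dp[i][0] = 1
def pvErr (l : List Int) (j : Int) : Int := if (0 : Int) ∈ l then pvN (azTail l) j else 0
def pvA (l : List Int) (j : Int) : Int := pvN l j - pvErr l j

theorem pvA_nil (j : Int) : pvA [] j = if j = 0 then 1 else 0 := by
  simp [pvA, pvErr, pvN_nil]

theorem pvA_neg (l : List Int) (hl : ∀ y ∈ l, 0 ≤ y) (j : Int) (hj : j < 0) : pvA l j = 0 := by
  unfold pvA pvErr
  rw [pvN_neg l hl j hj]
  by_cases h0 : (0 : Int) ∈ l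
  · rw [if_pos h0, pvN_neg _ (fun y hy => hl y (azTail_subset l y hy)) j hj]
    ring
  · simp [h0]

theorem pvA_zero (l : List Int) (hnd : l.Nodup) (hl : ∀ y ∈ l, 0 ≤ y) : pvA l 0 = 1 := by
  unfold pvA pvErr
  rw [pvN_zero_nodup l hnd hl]
  by_cases h0 : (0 : Int) ∈ l
  · rw [if_pos h0, if_pos h0, pvN_zero_pos _ (fun y hy => by
      have h1 := hl y (azTail_subset l y hy)
      have h2 : y ≠ 0 := by
        intro h; subst h; exact azTail_not_mem_zero l hnd hy
      omega)]
    norm_num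
  · simp [h0]

theorem pvA_concat (l : List Int) (x : Int) (hnd : (l ++ [x]).Nodup) (hx : 0 ≤ x)
    (hl : ∀ y ∈ l, 0 ≤ y) (j : Int) (hj : 1 ≤ j) :
    pvA (l ++ [x]) j = pvA l j + pvA l (j - x) := by
  unfold pvA pvErr
  rw [pvN_concat, azTail_append]
  by_cases h0l : (0 : Int) ∈ l
  · have hx0 : x ≠ 0 := by
      intro h
      subst h
      exact (List.nodup_append.mp hnd).2.2 0 h0l 0 (by simp) rfl
    rw [if_pos h0l, if_pos (by simp [h0l]), if_pos h0l, if_pos h0l, pvN_concat]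
    ring
  · by_cases hx0 : x = 0
    · subst hx0
      rw [if_pos (by simp), if_neg h0l, if_neg h0l, if_neg h0l, pvN_nil, if_neg (by omega)]
      simp
    · rw [if_neg (not_mem_append_singleton h0l (fun h => hx0 h.symm)), if_neg h0l, if_neg h0l]
      ring

-- ===== helpers about lists and the dp table (shared shape lemmas) =====
theorem set_map_range {α} (f : Nat → α) (N i : Nat) (v : α) :
    ((List.range N).map f).set i v = (List.range N).map (fun m => if m = i then v else f m) := by
  apply List.ext_getElem (by simp)
  intro r h1 h2
  simp only [List.getElem_set, List.getElem_map, List.getElem_range]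
  simp at h1
  by_cases hr : r = i
  · simp [hr]
  · simp [hr, show i ≠ r by omega]

theorem getD_map_range' {α} (f : Nat → α) (N i : Nat) (hi : i < N) (d : α) :
    ((List.range N).map f).getD i d = f i := by
  rw [List.getD_eq_getElem?_getD]
  simp [hi]

theorem set_append_len {α} (A : List α) (b v : α) (rest : List α) :
    (A ++ b :: rest).set A.length v = A ++ v :: rest := by
  induction A with
  | nil => rfl
  | cons a A ih => simp [List.set, ih]

theorem set_append_len' {α} (A : List α) (b v : α) (rest : List α) (k : Nat)
    (h : A.length = k) : (A ++ b :: rest).set k v = A ++ v :: rest := by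
  subst h; exact set_append_len A b v rest

theorem getD_set_ne {α} (l : List α) (i j : Nat) (v d : α) (h : i ≠ j) :
    (l.set i v).getD j d = l.getD j d := by
  simp [List.getD_eq_getElem?_getD, List.getElem?_set_ne h]

theorem getD_set_self {α} (l : List α) (i : Nat) (v d : α) (h : i < l.length) :
    (l.set i v).getD i d = v := by
  simp [List.getD_eq_getElem?_getD, List.getElem?_set_self, h]

theorem base_pass : ∀ (k : Nat) (t : List (List Int)), k ≤ t.length →
    (PySem.List.pyRange 0 (k : Int) 1).foldl
      (fun t i => PySem.List.pySetD t i (PySem.List.pySetD (PySem.List.pyGetD t i []) 0 1)) t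
    = (t.take k).map (fun r => r.set 0 1) ++ t.drop k := by
  intro k
  induction k with
  | zero => intro t _; simp [PySem.List.pyRange_one_eq_nil]
  | succ k ih =>
    intro t hk
    have hcast : ((k + 1 : Nat) : Int) = (k : Int) + 1 := by push_cast; ring
    rw [hcast, PySem.List.pyRange_one_succ_right (by omega), List.foldl_append,
      List.foldl_cons, List.foldl_nil, ih t (by omega)]
    have hklt : k < t.length := by omega
    have hdrop : t.drop k = t[k] :: t.drop (k + 1) := List.drop_eq_getElem_cons hklt
    have hget : PySem.List.pyGetD ((t.take k).map (fun r => r.set 0 1) ++ t.drop k) (k : Int) [] = t[k] := by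
      rw [PySem.List.pyGetD_natCast, hdrop, List.getD_eq_getElem?_getD,
        List.getElem?_append_right (by simp [Nat.min_eq_left (le_of_lt hklt)])]
      simp [Nat.min_eq_left (le_of_lt hklt), List.getElem?_eq_getElem hklt]
    rw [hget]
    have hset0 : PySem.List.pySetD t[k] (0 : Int) 1 = t[k].set 0 1 := by
      simp [pysem]
    rw [hset0, PySem.List.pySetD_natCast, hdrop]
    have hlen : ((t.take k).map (fun r => r.set 0 1)).length = k := by
      simp [Nat.min_eq_left (le_of_lt hklt)]
    rw [set_append_len' _ _ _ _ _ hlen]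
    have hmap : List.take (k+1) (List.map (fun r => r.set 0 1) t)
        = List.take k (List.map (fun r => r.set 0 1) t) ++ [t[k].set 0 1] := by
      rw [List.take_succ]
      simp [List.getElem?_eq_getElem hklt]
    simp [hmap]

-- row abstractions for A's dp
def pvBaseRow (tl : Nat) : List Int := (List.replicate tl 0).set 0 1
def pvRowA (nums : List Int) (tl m : Nat) : List Int :=
  (List.range tl).map (fun (j : Nat) => pvA (nums.take m) (j : Int))
def pvPartial (nums : List Int) (tl i m : Nat) : List Int :=
  (List.range tl).map (fun (j : Nat) => if j = 0 then (1:Int) else if j ≤ m then pvA (nums.take i) (j : Int) else 0)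

theorem pvBaseRow_eq (tl : Nat) :
    pvBaseRow tl = (List.range tl).map (fun j => if j = 0 then (1:Int) else 0) := by
  apply List.ext_getElem (by simp [pvBaseRow])
  intro r h1 h2
  simp only [pvBaseRow, List.getElem_set, List.getElem_map, List.getElem_range,
    List.getElem_replicate]
  by_cases hr : r = 0 <;> simp [hr, eq_comm]

theorem pvPartial_zero (nums : List Int) (tl i : Nat) :
    pvPartial nums tl i 0 = pvBaseRow tl := by
  rw [pvBaseRow_eq]
  unfold pvPartial
  apply List.map_congr_left
  intro j _
  by_cases hj : j = 0 <;> simp [hj]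

theorem pvRowA_zero (nums : List Int) (tl : Nat) : pvRowA nums tl 0 = pvBaseRow tl := by
  rw [pvBaseRow_eq]
  unfold pvRowA
  apply List.map_congr_left
  intro j _
  by_cases hj : j = 0 <;> simp [hj, pvA_nil]

theorem inner_pass (nums : List Int) (hnd : nums.Nodup) (hnn : ∀ y ∈ nums, 0 ≤ y)
    (target : Int) (ht : 0 ≤ target)
    (i : Nat) (h1 : 1 ≤ i) (hin : i ≤ nums.length)
    (T : List (List Int)) (hTlen : T.length = nums.length + 1)
    (hprev : T.getD (i-1) [] = pvRowA nums (target.toNat+1) (i-1))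
    (hcur : T.getD i [] = pvBaseRow (target.toNat+1)) :
    ∀ m : Nat, m ≤ target.toNat →
    (PySem.List.pyRange 1 ((m : Int)+1) 1).foldl (fun t j =>
        let x := PySem.List.pyGetD nums ((i : Int)-1) 0
        let v := if x ≤ j then
            PySem.List.pyGetD (PySem.List.pyGetD t ((i : Int)-1) []) j 0
              + PySem.List.pyGetD (PySem.List.pyGetD t ((i : Int)-1) []) (j - x) 0
          else PySem.List.pyGetD (PySem.List.pyGetD t ((i : Int)-1) []) j 0
        PySem.List.pySetD t (i : Int) (PySem.List.pySetD (PySem.List.pyGetD t (i : Int) []) j v)) T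
      = T.set i (pvPartial nums (target.toNat+1) i m) := by
  have hiT : i < T.length := by omega
  have hcast1 : (i : Int) - 1 = ((i - 1 : Nat) : Int) := by
    push_cast [Nat.cast_sub h1]; ring
  have hx : PySem.List.pyGetD nums ((i : Int)-1) 0 = nums[i-1]'(by omega) := by
    rw [hcast1, PySem.List.pyGetD_natCast, List.getD_eq_getElem?_getD,
      List.getElem?_eq_getElem (by omega)]
    rfl
  have hxnn : 0 ≤ nums[i-1]'(by omega) := hnn _ (List.getElem_mem _)
  have htake : nums.take i = nums.take (i-1) ++ [nums[i-1]'(by omega)] := by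
    conv_lhs => rw [show i = (i-1)+1 by omega]
    rw [List.take_succ, List.getElem?_eq_getElem (by omega)]
    rfl
  have hndtake : (nums.take (i-1) ++ [nums[i-1]'(by omega)]).Nodup := by
    rw [← htake]
    exact (List.take_sublist i nums).nodup hnd
  intro m
  induction m with
  | zero =>
    intro _
    rw [show ((0:Nat) : Int) + 1 = 1 by norm_num, PySem.List.pyRange_one_eq_nil (by norm_num),
      List.foldl_nil, pvPartial_zero, ← hcur]
    apply List.ext_getElem (by simp)
    intro r hr1 hr2
    rw [List.getElem_set]
    split
    · next heq =>
        subst heq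
        simp [List.getD_eq_getElem?_getD, List.getElem?_eq_getElem hiT]
    · rfl
  | succ m ih =>
    intro hm
    rw [show ((m+1:Nat) : Int) + 1 = ((m:Int)+1)+1 by push_cast; ring,
      PySem.List.pyRange_one_succ_right (by omega), List.foldl_append,
      List.foldl_cons, List.foldl_nil, ih (by omega)]
    dsimp only []
    have hjcast : (m : Int) + 1 = ((m+1 : Nat) : Int) := by push_cast; ring
    -- previous row lookup
    have hprevrow : PySem.List.pyGetD (T.set i (pvPartial nums (target.toNat+1) i m)) ((i : Int)-1) []
        = pvRowA nums (target.toNat+1) (i-1) := by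
      rw [hcast1, PySem.List.pyGetD_natCast, getD_set_ne _ _ _ _ _ (by omega), hprev]
    have hrowval : ∀ (r : Nat), r < target.toNat+1 →
        PySem.List.pyGetD (pvRowA nums (target.toNat+1) (i-1)) ((r : Nat) : Int) 0
          = pvA (nums.take (i-1)) (r : Int) := by
      intro r hr
      rw [PySem.List.pyGetD_natCast]
      exact getD_map_range' _ _ _ hr _
    -- the written value
    have hv : (if PySem.List.pyGetD nums ((i : Int)-1) 0 ≤ (m : Int)+1 then
          PySem.List.pyGetD (PySem.List.pyGetD (T.set i (pvPartial nums (target.toNat+1) i m)) ((i : Int)-1) []) ((m : Int)+1) 0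
            + PySem.List.pyGetD (PySem.List.pyGetD (T.set i (pvPartial nums (target.toNat+1) i m)) ((i : Int)-1) []) (((m : Int)+1) - PySem.List.pyGetD nums ((i : Int)-1) 0) 0
        else PySem.List.pyGetD (PySem.List.pyGetD (T.set i (pvPartial nums (target.toNat+1) i m)) ((i : Int)-1) []) ((m : Int)+1) 0)
        = pvA (nums.take i) ((m : Int)+1) := by
      rw [hprevrow, hx]
      set x := nums[i-1]'(by omega) with hxdef
      have hj1 : PySem.List.pyGetD (pvRowA nums (target.toNat+1) (i-1)) ((m : Int)+1) 0
          = pvA (nums.take (i-1)) ((m : Int)+1) := by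
        rw [hjcast]; exact hrowval (m+1) (by omega)
      rw [htake, pvA_concat _ _ hndtake hxnn
        (fun y hy => hnn y (List.mem_of_mem_take hy)) _ (by omega)]
      by_cases hxle : x ≤ (m : Int)+1
      · rw [if_pos hxle, hj1]
        congr 1
        have h0 : 0 ≤ (m : Int) + 1 - x := by omega
        have hlt : ((m : Int)+1 - x).toNat < target.toNat + 1 := by omega
        have hcast2 : (m : Int) + 1 - x = ((((m : Int)+1 - x).toNat : Nat) : Int) := by omega
        rw [hcast2, hrowval _ hlt]
      · rw [if_neg hxle, hj1]
        rw [pvA_neg (nums.take (i-1))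
          (fun y hy => hnn y (List.mem_of_mem_take hy)) ((m:Int)+1-x) (by omega), add_zero]
    rw [hv]
    -- current row update
    have hcurrow : PySem.List.pyGetD (T.set i (pvPartial nums (target.toNat+1) i m)) (i : Int) []
        = pvPartial nums (target.toNat+1) i m := by
      rw [PySem.List.pyGetD_natCast, getD_set_self _ _ _ _ hiT]
    rw [hcurrow]
    have hsetrow : PySem.List.pySetD (pvPartial nums (target.toNat+1) i m) ((m : Int)+1)
        (pvA (nums.take i) ((m : Int)+1))
        = pvPartial nums (target.toNat+1) i (m+1) := by
      rw [hjcast, PySem.List.pySetD_natCast]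
      unfold pvPartial
      rw [set_map_range]
      apply List.map_congr_left
      intro r _
      by_cases hr : r = m+1
      · simp [hr]
      · rw [if_neg hr]
        by_cases hr0 : r = 0
        · simp [hr0]
        · rw [if_neg hr0, if_neg hr0]
          by_cases hrm : r ≤ m
          · rw [if_pos hrm, if_pos (by omega)]
          · rw [if_neg hrm, if_neg (by omega)]
    rw [hsetrow, PySem.List.pySetD_natCast, List.set_set]

def pvTbl (nums : List Int) (target : Int) (k : Nat) : List (List Int) :=
  (List.range (nums.length+1)).map (fun m =>
    if m ≤ k then pvRowA nums (target.toNat+1) m else pvBaseRow (target.toNat+1))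

theorem pvPartial_full (nums : List Int) (hnd : nums.Nodup) (hnn : ∀ y ∈ nums, 0 ≤ y)
    (target : Int) (ht : 0 ≤ target) (i : Nat) (hin : i ≤ nums.length) :
    pvPartial nums (target.toNat+1) i target.toNat = pvRowA nums (target.toNat+1) i := by
  unfold pvPartial pvRowA
  apply List.map_congr_left
  intro j hj
  simp only [List.mem_range] at hj
  by_cases hj0 : j = 0
  · rw [if_pos hj0, hj0]
    exact (pvA_zero (nums.take i) ((List.take_sublist i nums).nodup hnd)
      (fun y hy => hnn y (List.mem_of_mem_take hy))).symm
  · rw [if_neg hj0, if_pos (by omega)]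

theorem outer_pass (nums : List Int) (hnd : nums.Nodup) (hnn : ∀ y ∈ nums, 0 ≤ y)
    (target : Int) (ht : 0 ≤ target) :
    ∀ k : Nat, k ≤ nums.length →
    (PySem.List.pyRange 1 ((k : Int)+1) 1).foldl (fun t i =>
      (PySem.List.pyRange 1 (target+1) 1).foldl (fun t j =>
        let x := PySem.List.pyGetD nums (i-1) 0
        let v := if x ≤ j then
            PySem.List.pyGetD (PySem.List.pyGetD t (i-1) []) j 0
              + PySem.List.pyGetD (PySem.List.pyGetD t (i-1) []) (j - x) 0
          else PySem.List.pyGetD (PySem.List.pyGetD t (i-1) []) j 0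
        PySem.List.pySetD t i (PySem.List.pySetD (PySem.List.pyGetD t i []) j v)) t)
      (List.replicate (nums.length+1) (pvBaseRow (target.toNat+1)))
    = pvTbl nums target k := by
  intro k
  induction k with
  | zero =>
    intro _
    rw [show ((0:Nat) : Int) + 1 = 1 by norm_num,
      show PySem.List.pyRange 1 (1:Int) 1 = [] from PySem.List.pyRange_one_eq_nil (by norm_num),
      List.foldl_nil]
    apply List.ext_getElem (by simp [pvTbl])
    intro r h1 h2
    simp only [List.length_replicate] at h1
    rw [List.getElem_replicate]
    unfold pvTbl
    rw [List.getElem_map, List.getElem_range]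
    by_cases hr : r = 0
    · rw [if_pos (by omega), hr, pvRowA_zero]
    · rw [if_neg (by omega)]
  | succ k ih =>
    intro hk
    rw [show ((k+1:Nat) : Int) + 1 = ((k:Int)+1)+1 by push_cast; ring,
      show PySem.List.pyRange 1 (((k:Int)+1)+1) 1
          = PySem.List.pyRange 1 ((k:Int)+1) 1 ++ [(k:Int)+1] from
        PySem.List.pyRange_one_succ_right (by omega),
      List.foldl_append, List.foldl_cons, List.foldl_nil, ih (by omega)]
    have htl : target + 1 = ((target.toNat : Int)) + 1 := by omega
    have hgprev : (pvTbl nums target k).getD ((k+1)-1) [] = pvRowA nums (target.toNat+1) ((k+1)-1) := by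
      unfold pvTbl
      rw [show (k+1)-1 = k by omega, getD_map_range' _ _ _ (by omega), if_pos (le_refl k)]
    have hgcur : (pvTbl nums target k).getD (k+1) [] = pvBaseRow (target.toNat+1) := by
      unfold pvTbl
      rw [getD_map_range' _ _ _ (by omega), if_neg (by omega)]
    have := inner_pass nums hnd hnn target ht (k+1) (by omega) (by omega) (pvTbl nums target k)
      (by simp [pvTbl]) hgprev hgcur target.toNat (le_refl _)
    rw [show ((k:Int)+1) = (((k+1:Nat)) : Int) by push_cast; ring, htl, this,
      pvPartial_full nums hnd hnn target ht (k+1) (by omega)]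
    unfold pvTbl
    rw [set_map_range]
    apply List.map_congr_left
    intro r _
    by_cases hr : r = k+1
    · simp [hr]
    · rw [if_neg hr]
      by_cases hrk : r ≤ k
      · rw [if_pos hrk, if_pos (by omega)]
      · rw [if_neg hrk, if_neg (by omega)]

-- A computes floordiv (pvA nums target) 2 on nonnegative distinct inputs with even total ≥ 2
theorem A_main (nums : List Int) (hnd : nums.Nodup) (hnn : ∀ y ∈ nums, 0 ≤ y)
    (hmod : ¬ PySem.Int.mod nums.sum 2 ≠ 0) (h2 : 0 ≤ nums.sum) :
    count_equal_subset_sum_partitions nums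
      = PySem.Int.floordiv (pvA nums (PySem.Int.floordiv nums.sum 2)) 2 := by
  unfold count_equal_subset_sum_partitions
  have hset : PySem.Set.ofList nums = nums := PySem.Set.ofList_eq_self_of_nodup nums hnd
  rw [hset, if_neg (show ¬ (nums.length ≠ nums.length) from fun h => h rfl), if_neg hmod]
  dsimp only []
  set t := PySem.Int.floordiv nums.sum 2 with htdef
  have ht : 0 ≤ t := by
    rw [htdef, PySem.Int.floordiv_eq_ediv_of_pos (by norm_num)]
    exact Int.ediv_nonneg h2 (by norm_num)
  have htoNat : (t+1).toNat = t.toNat + 1 := by omega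
  have hbase := base_pass (nums.length+1)
    (List.replicate (nums.length+1) (List.replicate (t.toNat+1) 0)) (by simp)
  rw [htoNat, show ((nums.length : Int)+1) = ((nums.length+1 : Nat) : Int) by push_cast; ring,
    hbase]
  rw [show (List.map (fun r => r.set 0 1)
        (List.take (nums.length+1) (List.replicate (nums.length+1) (List.replicate (t.toNat+1) (0:Int))))
      ++ List.drop (nums.length+1) (List.replicate (nums.length+1) (List.replicate (t.toNat+1) (0:Int))))
      = List.replicate (nums.length+1) (pvBaseRow (t.toNat+1)) by
    simp [List.map_replicate, pvBaseRow]]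
  have houter := outer_pass nums hnd hnn t ht nums.length (le_refl _)
  dsimp only [] at houter
  rw [show ((nums.length : Int)+1) = ((nums.length+1 : Nat) : Int) by push_cast; ring] at houter
  rw [houter]
  rw [PySem.List.pyGetD_natCast]
  unfold pvTbl
  rw [getD_map_range' _ _ _ (by omega), if_pos (le_refl _)]
  rw [show t = ((t.toNat : Nat) : Int) by omega, PySem.List.pyGetD_natCast]
  unfold pvRowA
  rw [getD_map_range' _ _ _ (by omega), List.take_length]

-- ===== B-side lemmas: meet in the middle computes pvN =====
theorem subsetSums_append (l : List Int) (x : Int) :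
    subsetSums (l ++ [x]) = subsetSums l ++ (subsetSums l).map (fun s => s + x) := by
  unfold subsetSums
  rw [List.foldl_append, List.foldl_cons, List.foldl_nil]

theorem count_subsetSums (l : List Int) (j : Int) :
    ((subsetSums l).count j : Int) = pvN l j := by
  induction l using List.reverseRecOn generalizing j with
  | nil =>
    rw [pvN_nil]
    by_cases hj : j = 0
    · simp [subsetSums, hj]
    · simp [subsetSums, hj, List.count_singleton]
      intro h
      exact absurd h.symm hj
  | append_singleton l x ih =>
    rw [subsetSums_append, List.count_append, pvN_concat, ← ih j, ← ih (j - x)]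
    have : List.count j ((subsetSums l).map (fun s => s + x)) = List.count (j - x) (subsetSums l) := by
      have hinj : Function.Injective (fun s : Int => s + x) := fun a b h => by
        simpa using h
      have := List.count_map_of_injective (l := subsetSums l) (f := fun s : Int => s + x)
        (x := j - x) hinj
      simpa using this
    rw [this]
    push_cast
    ring

theorem foldl_add_map {α} (l : List α) (f : α → Int) :
    ∀ (i : Int), l.foldl (fun a s => a + f s) i = i + (l.map f).sum := by
  induction l with
  | nil => intro i; simp
  | cons x xs ih =>
    intro i
    rw [List.foldl_cons, ih, List.map_cons, List.sum_cons]
    ring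

theorem join_sum (L R : List Int) : ∀ (t : Int),
    ((subsetSums R).map (fun s => pvN L (t - s))).sum = pvN (L ++ R) t := by
  induction R using List.reverseRecOn with
  | nil =>
    intro t
    simp [subsetSums, pvN]
  | append_singleton R x ih =>
    intro t
    rw [subsetSums_append, List.map_append, List.sum_append, List.map_map]
    have h2 : ((subsetSums R).map ((fun s => pvN L (t - s)) ∘ fun s => s + x)).sum
        = ((subsetSums R).map (fun s => pvN L ((t - x) - s))).sum := by
      congr 1
      apply List.map_congr_left
      intro s _
      simp [Function.comp]
      ring_nf
    rw [h2, ih t, ih (t - x), ← List.append_assoc, pvN_concat]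

theorem getD_count_fold (l : List Int) (q : Int) :
    (l.foldl (fun d s => d.insert s (d.getD s 0 + 1)) PySem.Dict.empty).getD q 0
      = (l.count q : Int) := by
  rw [PySem.Dict.getD_foldl_insert_add_one]
  simp

theorem B_main (nums : List Int) (hnd : nums.Nodup)
    (hmod : ¬ PySem.Int.mod nums.sum 2 ≠ 0) :
    count_equal_subset_sum_partitions_alt nums
      = PySem.Int.floordiv (pvN nums (PySem.Int.floordiv nums.sum 2)) 2 := by
  unfold count_equal_subset_sum_partitions_alt
  have hset : PySem.Set.ofList nums = nums := PySem.Set.ofList_eq_self_of_nodup nums hnd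
  rw [hset, if_neg (show ¬ (nums.length ≠ nums.length) from fun h => h rfl), if_neg hmod]
  dsimp only []
  set t := PySem.Int.floordiv nums.sum 2 with htdef
  have hmid : PySem.Int.floordiv (nums.length : Int) 2 = ((nums.length / 2 : Nat) : Int) := by
    exact_mod_cast PySem.Int.floordiv_natCast nums.length 2
  rw [hmid, PySem.List.slice_to_natCast, PySem.List.slice_from_natCast]
  rw [foldl_add_map]
  have hmapeq : ((subsetSums (nums.drop (nums.length / 2))).map
      (fun s => ((subsetSums (nums.take (nums.length / 2))).foldl
        (fun d s => d.insert s (d.getD s 0 + 1)) PySem.Dict.empty).getD (t - s) 0))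
      = ((subsetSums (nums.drop (nums.length / 2))).map
        (fun s => pvN (nums.take (nums.length / 2)) (t - s))) := by
    apply List.map_congr_left
    intro s _
    rw [getD_count_fold, count_subsetSums]
  rw [hmapeq, join_sum, List.take_append_drop]
  ring_nf

-- both return 0 on odd totals
theorem both_odd (nums : List Int) (hnd : nums.Nodup)
    (hmod : PySem.Int.mod nums.sum 2 ≠ 0) :
    count_equal_subset_sum_partitions nums = 0 ∧
    count_equal_subset_sum_partitions_alt nums = 0 := by
  have hset : PySem.Set.ofList nums = nums := PySem.Set.ofList_eq_self_of_nodup nums hnd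
  constructor
  · unfold count_equal_subset_sum_partitions
    rw [hset, if_neg (show ¬ (nums.length ≠ nums.length) from fun h => h rfl), if_pos hmod]
  · unfold count_equal_subset_sum_partitions_alt
    rw [hset, if_neg (show ¬ (nums.length ≠ nums.length) from fun h => h rfl), if_pos hmod]

-- ===== VERDICT (by name: the statements are the Claim_ definitions above) =====
theorem count_equal_subset_sum_partitions_spec :
    Claim_unchanged_count_equal_subset_sum_partitions := by
  intro nums _ hpre
  unfold Spec_count_equal_subset_sum_partitions
  intro hnD
  obtain ⟨hnd, hcase⟩ := hpre
  by_cases hmod : PySem.Int.mod nums.sum 2 ≠ 0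
  · obtain ⟨h1, h2⟩ := both_odd nums hnd hmod
    rw [h1, h2]
  · rcases hcase with h | h0 | ⟨h2, hnn⟩
    · exact absurd h hmod
    · -- total 0: outside D_ forces nums = []
      have hnil : nums = [] := by
        by_contra hne
        exact hnD ⟨hnd, not_not.mp hmod, Or.inl ⟨hne, h0⟩⟩
      subst hnil
      decide
    · rw [A_main nums hnd hnn hmod (by omega), B_main nums hnd hmod]
      have herr : pvErr nums (PySem.Int.floordiv nums.sum 2) = 0 := by
        unfold pvErr
        by_cases h0 : (0 : Int) ∈ nums
        · rw [if_pos h0]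
          have hne : ¬ ∃ s ∈ (azTail nums).sublists, 2 * s.sum = nums.sum := by
            intro hex
            exact hnD ⟨hnd, not_not.mp hmod, Or.inr ⟨h2, hnn, h0, hex⟩⟩
          have hts : 2 * PySem.Int.floordiv nums.sum 2 = nums.sum := by
            have hm := not_not.mp hmod
            rw [PySem.Int.floordiv_eq_ediv_of_pos (by norm_num)]
            rw [PySem.Int.mod_eq_emod_of_pos (by norm_num)] at hm
            omega
          have hcount : (azTail nums).sublists.countP
              (fun s => s.sum = PySem.Int.floordiv nums.sum 2) = 0 := by
            rw [List.countP_eq_zero]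
            intro s hs
            simp only [decide_eq_true_eq]
            intro hsum
            exact hne ⟨s, hs, by omega⟩
          unfold pvN
          rw [hcount]
          rfl
        · rw [if_neg h0]
      unfold pvA
      rw [herr, sub_zero]

theorem count_equal_subset_sum_partitions_changed :
    Claim_changed_count_equal_subset_sum_partitions := by
  unfold Claim_changed_count_equal_subset_sum_partitions
  decide

-- ===== tightness: A ≠ B everywhere inside D_ =====

theorem two_le_length_of_two_mem {α} {l : List α} {a b : α}
    (ha : a ∈ l) (hb : b ∈ l) (hab : a ≠ b) : 2 ≤ l.length := by
  obtain ⟨s, t, rfl⟩ := List.append_of_mem ha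
  rcases List.mem_append.mp hb with h | h
  · have := List.length_pos_of_mem h
    simp
    omega
  · have hbt : b ∈ t := by
      rcases List.mem_cons.mp h with h1 | h1
      · exact absurd h1.symm hab
      · exact h1
    have := List.length_pos_of_mem hbt
    simp
    omega

theorem two_le_pvN_zero (nums : List Int) (hne : nums ≠ []) (hsum : nums.sum = 0) :
    2 ≤ pvN nums 0 := by
  unfold pvN
  have h1 : ([] : List Int) ∈ nums.sublists.filter (fun s => decide (s.sum = 0)) := by
    simp
  have h2 : nums ∈ nums.sublists.filter (fun s => decide (s.sum = 0)) := by
    simp [hsum, List.mem_sublists]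
  have := two_le_length_of_two_mem h1 h2 (fun h => hne h.symm)
  rw [List.countP_eq_length_filter]
  omega

theorem even_length_pairing {α : Type} [DecidableEq α] :
    ∀ (n : Nat) (F : List α) (f : α → α), F.length = n → F.Nodup →
      (∀ a ∈ F, f a ∈ F) → (∀ a ∈ F, f (f a) = a) → (∀ a ∈ F, f a ≠ a) →
      Even n := by
  intro n
  induction n using Nat.strong_induction_on with
  | _ n ih =>
    intro F f hlen hnd hcl hinv hfix
    cases F with
    | nil =>
      subst hlen
      simp
    | cons a F' =>
      have hndF' : F'.Nodup := (List.nodup_cons.mp hnd).2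
      have haF' : a ∉ F' := (List.nodup_cons.mp hnd).1
      have hfa : f a ∈ F' := by
        rcases List.mem_cons.mp (hcl a (by simp)) with h | h
        · exact absurd h (hfix a (by simp))
        · exact h
      have hF'ne : 1 ≤ F'.length := List.length_pos_of_mem hfa
      have hlenG : (F'.erase (f a)).length = n - 2 := by
        rw [List.length_erase_of_mem hfa]
        simp at hlen
        omega
      have hn2 : 2 ≤ n := by
        simp at hlen
        omega
      have hev : Even (n - 2) := by
        refine ih (n-2) (by omega) (F'.erase (f a)) f hlenG (hndF'.erase _) ?_ ?_ ?_
        · intro b hb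
          have hbF' : b ∈ F' := List.mem_of_mem_erase hb
          have hbne : b ≠ f a := ((hndF'.mem_erase_iff).mp hb).1
          have hfb : f b ∈ a :: F' := hcl b (by simp [hbF'])
          have hfbne_a : f b ≠ a := by
            intro h
            have hfb2 := hinv b (by simp [hbF'])
            rw [h] at hfb2
            exact hbne hfb2.symm
          have hfbF' : f b ∈ F' := by
            rcases List.mem_cons.mp hfb with h | h
            · exact absurd h hfbne_a
            · exact h
          have hfbne_fa : f b ≠ f a := by
            intro h
            have hba : b = a := by
              have h1 := hinv b (by simp [hbF'])
              have h2 := hinv a (by simp)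
              rw [h] at h1
              rw [h2] at h1
              exact h1.symm
            exact haF' (hba ▸ hbF')
          exact (hndF'.mem_erase_iff).mpr ⟨hfbne_fa, hfbF'⟩
        · intro b hb
          exact hinv b (by simp [List.mem_of_mem_erase hb])
        · intro b hb
          exact hfix b (by simp [List.mem_of_mem_erase hb])
      obtain ⟨k, hk⟩ := hev
      exact ⟨k + 1, by omega⟩

theorem filter_mem_of_sublist (nums s : List Int) (h : s.Sublist nums) (hnd : nums.Nodup) :
    nums.filter (fun a => decide (a ∈ s)) = s := by
  induction h with
  | slnil => rfl
  | @cons l₁ l₂ a h ih =>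
    have hnd2 := List.nodup_cons.mp hnd
    have hna : a ∉ l₁ := fun hx => hnd2.1 (h.subset hx)
    rw [List.filter_cons, if_neg (by simp [hna])]
    exact ih hnd2.2
  | @cons₂ l₁ l₂ a h ih =>
    have hnd2 := List.nodup_cons.mp hnd
    rw [List.filter_cons, if_pos (by simp)]
    congr 1
    rw [show l₂.filter (fun b => decide (b ∈ a :: l₁)) = l₂.filter (fun b => decide (b ∈ l₁)) from
      List.filter_congr (fun b hb => by
        simp only [List.mem_cons, decide_eq_decide]
        have : b ≠ a := fun hba => hnd2.1 (hba ▸ hb)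
        tauto)]
    exact ih hnd2.2

theorem sum_filter_split (p : Int → Bool) : ∀ (l : List Int),
    (l.filter p).sum + (l.filter (fun a => !p a)).sum = l.sum := by
  intro l
  induction l with
  | nil => simp
  | cons x xs ih =>
    by_cases hx : p x = true <;> simp [List.filter_cons, hx] <;> omega

theorem sum_split_of_sublist (nums s : List Int) (h : s.Sublist nums) (hnd : nums.Nodup) :
    (nums.filter (fun a => decide (a ∉ s))).sum = nums.sum - s.sum := by
  have hsplit : (nums.filter (fun a => decide (a ∈ s))).sum
      + (nums.filter (fun a => decide (a ∉ s))).sum = nums.sum := by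
    rw [show nums.filter (fun a => decide (a ∉ s)) = nums.filter (fun a => !(decide (a ∈ s))) from
      List.filter_congr (fun b _ => by simp)]
    exact sum_filter_split _ nums
  rw [filter_mem_of_sublist nums s h hnd] at hsplit
  omega

theorem pvN_even (nums : List Int) (t : Int) (hnd : nums.Nodup) (hts : 2 * t = nums.sum)
    (ht1 : 1 ≤ t) : ∃ k : Int, pvN nums t = 2 * k := by
  have hev : Even ((nums.sublists.filter (fun s => decide (s.sum = t))).length) := by
    apply even_length_pairing _ _ (fun s => nums.filter (fun a => decide (a ∉ s))) rfl
      ((List.nodup_sublists.mpr hnd).filter _)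
    · -- closure
      intro s hs
      have h1 := List.mem_filter.mp hs
      have hsub : s.Sublist nums := List.mem_sublists.mp h1.1
      have hsum : s.sum = t := by simpa using h1.2
      refine List.mem_filter.mpr ⟨List.mem_sublists.mpr (List.filter_sublist), ?_⟩
      rw [sum_split_of_sublist nums s hsub hnd, hsum]
      simp only [decide_eq_true_eq]
      omega
    · -- involution
      intro s hs
      have h1 := List.mem_filter.mp hs
      have hsub : s.Sublist nums := List.mem_sublists.mp h1.1
      rw [show nums.filter (fun a => decide (a ∉ nums.filter (fun b => decide (b ∉ s))))
          = nums.filter (fun a => decide (a ∈ s)) from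
        List.filter_congr (fun b hb => by
          simp only [decide_eq_decide, List.mem_filter, decide_eq_true_eq]
          tauto)]
      exact filter_mem_of_sublist nums s hsub hnd
    · -- no fixed point
      intro s hs heq
      have h1 := List.mem_filter.mp hs
      have hsum : s.sum = t := by simpa using h1.2
      cases s with
      | nil =>
        have : nums.filter (fun a => decide ((a : Int) ∉ ([] : List Int))) = nums := by
          rw [show (fun a => decide ((a : Int) ∉ ([] : List Int))) = (fun a => true) from
            funext (fun a => by simp)]
          exact List.filter_true nums
        rw [this] at heq
        have : nums.sum = 0 := by rw [heq]; rfl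
        omega
      | cons a s' =>
        have ha : a ∈ nums.filter (fun b => decide (b ∉ a :: s')) := by
          rw [heq]; simp
        have := (List.mem_filter.mp ha).2
        simp at this
  obtain ⟨k, hk⟩ := hev
  refine ⟨(k : Int), ?_⟩
  unfold pvN
  rw [List.countP_eq_length_filter, hk]
  push_cast
  ring

theorem azTail_sublist (l : List Int) : (azTail l).Sublist l := by
  induction l with
  | nil => simp [azTail]
  | cons x xs ih =>
    unfold azTail
    by_cases hx : x = 0
    · rw [if_pos hx]
      exact List.sublist_cons_self x xs
    · rw [if_neg hx]
      exact ih.trans (List.sublist_cons_self x xs)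

theorem pvN_azTail_le (nums : List Int) (t : Int) : pvN (azTail nums) t ≤ pvN nums t := by
  unfold pvN
  have h1 := (List.sublists_perm_sublists' (azTail nums)).countP_eq (fun s => decide (s.sum = t))
  have h2 := (List.sublists_perm_sublists' nums).countP_eq (fun s => decide (s.sum = t))
  rw [h1, h2]
  have h3 : (azTail nums).sublists'.countP (fun s => decide (s.sum = t))
      ≤ nums.sublists'.countP (fun s => decide (s.sum = t)) :=
    ((azTail_sublist nums).sublists').countP_le
  omega

-- A returns 0 whenever the total is 0 (the target is 0, the inner loops are empty, dp[n][0] stays 1)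
theorem A_zero_sum (nums : List Int) (hnd : nums.Nodup) (hsum : nums.sum = 0) :
    count_equal_subset_sum_partitions nums = 0 := by
  unfold count_equal_subset_sum_partitions
  have hset : PySem.Set.ofList nums = nums := PySem.Set.ofList_eq_self_of_nodup nums hnd
  rw [hset, if_neg (show ¬ (nums.length ≠ nums.length) from fun h => h rfl), hsum,
    if_neg (show ¬ (PySem.Int.mod 0 2 ≠ 0) from by decide)]
  dsimp only []
  rw [show PySem.Int.floordiv 0 2 = 0 from by decide]
  have hin : PySem.List.pyRange 1 ((0:Int)+1) 1 = [] :=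
    PySem.List.pyRange_one_eq_nil (by norm_num)
  rw [hin]
  simp only [List.foldl_nil]
  rw [List.foldl_fixed' (fun _ => rfl)]
  have hbase := base_pass (nums.length+1)
    (List.replicate (nums.length+1) (List.replicate ((0:Int)+1).toNat 0)) (by simp)
  rw [show ((nums.length : Int)+1) = ((nums.length+1 : Nat) : Int) by push_cast; ring, hbase]
  rw [show (List.map (fun r => r.set 0 1)
        (List.take (nums.length+1) (List.replicate (nums.length+1) (List.replicate ((0:Int)+1).toNat (0:Int))))
      ++ List.drop (nums.length+1) (List.replicate (nums.length+1) (List.replicate ((0:Int)+1).toNat (0:Int))))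
      = List.replicate (nums.length+1) ([1] : List Int) by
    simp [List.map_replicate]]
  rw [PySem.List.pyGetD_natCast, List.getD_eq_getElem?_getD, List.getElem?_replicate,
    if_pos (by omega)]
  decide

theorem count_equal_subset_sum_partitions_tight :
    Claim_exact_count_equal_subset_sum_partitions := by
  intro nums _ hpre hD
  obtain ⟨hnd, hm0, hcase⟩ := hD
  have hmod : ¬ PySem.Int.mod nums.sum 2 ≠ 0 := not_not.mpr hm0
  rcases hcase with ⟨hne, h0⟩ | ⟨h2, hnn, h0m, s0, hs0, hsum0⟩
  · rw [A_zero_sum nums hnd h0, B_main nums hnd hmod]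
    have hE : 2 ≤ pvN nums (PySem.Int.floordiv nums.sum 2) := by
      rw [h0, show PySem.Int.floordiv 0 2 = 0 from by decide]
      exact two_le_pvN_zero nums hne h0
    rw [PySem.Int.floordiv_eq_ediv_of_pos (by norm_num)]
    intro hAB
    omega
  · rw [A_main nums hnd hnn hmod (by omega), B_main nums hnd hmod]
    set t := PySem.Int.floordiv nums.sum 2 with htdef
    have hts : 2 * t = nums.sum := by
      rw [htdef, PySem.Int.floordiv_eq_ediv_of_pos (by norm_num)]
      rw [PySem.Int.mod_eq_emod_of_pos (by norm_num)] at hm0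
      omega
    have ht1 : 1 ≤ t := by omega
    have he1 : 1 ≤ pvErr nums t := by
      unfold pvErr
      rw [if_pos h0m]
      unfold pvN
      have : 0 < (azTail nums).sublists.countP (fun s => decide (s.sum = t)) := by
        rw [List.countP_pos_iff]
        exact ⟨s0, hs0, by simp only [decide_eq_true_eq]; omega⟩
      omega
    have heE : pvErr nums t ≤ pvN nums t := by
      unfold pvErr
      rw [if_pos h0m]
      exact pvN_azTail_le nums t
    obtain ⟨k, hk⟩ := pvN_even nums t hnd hts ht1
    unfold pvA
    rw [hk, PySem.Int.floordiv_eq_ediv_of_pos (by norm_num),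
      PySem.Int.floordiv_eq_ediv_of_pos (by norm_num)]
    rw [hk] at heE
    intro hAB
    omega
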